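-- pv_equiv track=rewrite | github.com/uxrm5c3/willcraft-ai | documents/probate_generator.py | _estimate_line_len
-- ===== SOURCE A (Python) =====
-- def _estimate_line_len(text):
--     """Estimate the visual length of text in approximate character widths.
--
--     Tabs count as 8 chars (default tab stop ~0.5 inch ≈ 5-6 chars at 11pt).
--     """
--     length = 0
--     for ch in text:
--         if ch == '\t':
--             length += 8
--         else:
--             length += 1
--     return length
-- ===== SOURCE B (Python) =====
-- def _estimate_line_len(text):
--     """Estimate the visual length of text in approximate character widths.
--
--     Tabs count as 8 chars (default tab stop ~0.5 inch ≈ 5-6 chars at 11pt).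
--     """
--     return len(text) + 7 * text.count('\t')
-- ===== Notes on version B (the rewrite author's own statement) =====
-- stated objective: simpler
-- what changed: Replaces the per-character branching accumulation loop with a closed form: base length via len plus 7 extra per tab character counted once via str.count.
import Mathlib
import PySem

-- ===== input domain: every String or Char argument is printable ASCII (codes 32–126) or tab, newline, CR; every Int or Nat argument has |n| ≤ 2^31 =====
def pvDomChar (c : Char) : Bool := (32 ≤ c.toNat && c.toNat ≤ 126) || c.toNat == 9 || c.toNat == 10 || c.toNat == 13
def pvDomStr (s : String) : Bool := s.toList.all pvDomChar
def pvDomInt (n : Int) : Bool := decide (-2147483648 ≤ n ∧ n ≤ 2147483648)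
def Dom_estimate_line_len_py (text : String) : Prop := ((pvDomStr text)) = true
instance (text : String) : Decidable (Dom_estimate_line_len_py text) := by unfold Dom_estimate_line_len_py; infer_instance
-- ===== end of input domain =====

-- B replaces A's per-character accumulation loop with the closed form len(text) + 7*count(text,'\t') (objective: simpler).


-- ===== PORT A =====
-- for ch in text: if ch == '\t': length += 8 else: length += 1
def estimate_line_len_py (text : String) : Int :=
  text.toList.foldl (fun length ch => if ch == '\t' then length + 8 else length + 1) 0

-- ===== PORT B =====
-- len(text) + 7 * text.count('\t')
def estimate_line_len_py_alt (text : String) : Int :=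
  (PySem.Str.len text : Int) + 7 * (PySem.Str.count text "\t" : Int)

-- ===== PRECONDITION & SPEC =====
def Spec_estimate_line_len_py (text : String) (out : Int) : Prop := out = estimate_line_len_py_alt text
instance (text : String) (out : Int) : Decidable (Spec_estimate_line_len_py text out) := by unfold Spec_estimate_line_len_py; infer_instance

-- ===== CLAIM (what is proved, stated in full; the proofs are below) =====
def Claim_equal_estimate_line_len_py : Prop := ∀ (text : String), Dom_estimate_line_len_py text → Spec_estimate_line_len_py text (estimate_line_len_py text)

-- ===== LEMMAS AND PROOFS =====

-- Chars.count with a single-character needle is List.count (the fuel-counting loop steps one char at a time there).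
theorem chars_count_go_singleton (c : Char) (fuel : Nat) :
    ∀ (s : List Char) (acc : Nat), s.length ≤ fuel →
      PySem.Chars.count.go [c] fuel s acc = acc + s.count c := by
  induction fuel with
  | zero =>
      intro s acc h
      cases s with
      | nil => simp [PySem.Chars.count.go]
      | cons a t => simp at h
  | succ n ih =>
      intro s acc h
      cases s with
      | nil => simp [PySem.Chars.count.go]
      | cons a t =>
          simp only [List.length_cons, Nat.succ_le_succ_iff] at h
          by_cases hc : a = c
          · subst hc
            have hp : List.isPrefixOf [a] (a :: t) = true := by
              simp [List.isPrefixOf]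
            simp only [PySem.Chars.count.go, hp, if_pos]
            rw [show List.drop (List.length [a]) (a :: t) = t by simp]
            rw [ih t (acc + 1) h]
            simp [List.count_cons]
            omega
          · have hp : List.isPrefixOf [c] (a :: t) = false := by
              simp [List.isPrefixOf]
              exact fun hac => hc hac.symm
            simp only [PySem.Chars.count.go, hp]
            rw [if_neg (by simp)]
            rw [ih t acc h]
            simp [List.count_cons, hc]

theorem chars_count_singleton (s : List Char) (c : Char) :
    PySem.Chars.count s [c] = s.count c := by
  unfold PySem.Chars.count
  simp only [List.isEmpty_cons, if_false]
  exact chars_count_go_singleton c s.length s 0 (le_refl _) |>.trans (by omega)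

theorem foldl_tab_eq (l : List Char) :
    ∀ (a : Int),
      l.foldl (fun length ch => if ch == '\t' then length + 8 else length + 1) a
        = a + l.length + 7 * l.count '\t' := by
  induction l with
  | nil => intro a; simp
  | cons x t ih =>
      intro a
      by_cases hx : x = '\t'
      · subst hx
        simp only [List.foldl_cons, beq_self_eq_true, if_pos, ih, List.count_cons,
          List.length_cons]
        simp
        push_cast
        ring
      · simp only [List.foldl_cons]
        rw [if_neg (by simp [hx]), ih]
        simp [List.count_cons, hx]
        push_cast
        ring

-- ===== VERDICT (by name: the statement is the Claim_ definition above) =====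
theorem estimate_line_len_py_spec : Claim_equal_estimate_line_len_py := by
  intro text _
  unfold Spec_estimate_line_len_py estimate_line_len_py estimate_line_len_py_alt
  rw [foldl_tab_eq]
  rw [PySem.Str.count_eq]
  have h : ("\t" : String).toList = ['\t'] := rfl
  rw [h, chars_count_singleton]
  simp [PySem.Str.len]
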